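-- pv_equiv track=rewrite | github.com/COL-IU/ClonalTREE | myutils.py | white_list
-- ===== SOURCE A (Python) =====
-- def white_list(variants, clones):
--     out = {}
--     for variant in variants:
--         temp = set()
--         for clone in map(set, clones):
--             if variant in clone:
--                 temp.update(clone)
--         if len(temp) == 0:
--             temp = set(variants)
--         temp.remove(variant)
--         out[variant] = temp
--     return out
-- ===== SOURCE B (Python) =====
-- def white_list(variants, clones):
--     # Index each variant to the union of the clone sets containing it, in one
--     # pass over the clones; then answer every variant by a single lookup.
--     idx = {}
--     for clone in clones:
--         cs = set(clone)
--         for v in cs: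
--             s = idx.get(v)
--             if s is None:
--                 idx[v] = set(cs)
--             else:
--                 s.update(cs)
--     base = set(variants)
--     out = {}
--     for v in variants:
--         temp = idx.get(v)
--         if temp is None:
--             temp = base
--         r = set(temp)
--         r.discard(v)
--         out[v] = r
--     return out
-- ===== Notes on version B (the rewrite author's own statement) =====
-- stated objective: alternative
-- what changed: Instead of rescanning and re-setifying every clone for every variant, B builds each clone set once and in a single pass indexes each variant to the union of the clone sets containing it, so each variant's answer is one dictionary lookup.
import Mathlib
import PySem

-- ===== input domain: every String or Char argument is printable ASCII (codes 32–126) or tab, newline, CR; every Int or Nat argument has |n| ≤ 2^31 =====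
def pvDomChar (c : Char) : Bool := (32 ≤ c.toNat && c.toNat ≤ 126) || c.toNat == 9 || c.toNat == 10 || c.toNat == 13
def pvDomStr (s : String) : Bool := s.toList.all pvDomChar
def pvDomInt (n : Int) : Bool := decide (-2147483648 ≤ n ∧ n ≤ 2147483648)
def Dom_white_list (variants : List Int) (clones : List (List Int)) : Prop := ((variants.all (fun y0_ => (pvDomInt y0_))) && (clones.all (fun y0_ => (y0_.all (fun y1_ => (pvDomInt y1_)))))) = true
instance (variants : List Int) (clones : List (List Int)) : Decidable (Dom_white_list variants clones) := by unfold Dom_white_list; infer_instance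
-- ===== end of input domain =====

-- B replaces A's per-variant rescan of all clones by a one-pass variant→union-of-containing-clones index (alternative algorithm; return values proved equal).


-- ===== PORT A =====
-- for variant in variants: temp = union of set(clone) over clones containing variant;
-- if empty, temp = set(variants); temp.remove(variant); out[variant] = temp.
-- 'temp.remove(variant)' cannot raise (variant ∈ temp always holds); the 'none' branch is unreachable.
def white_list (variants : List Int) (clones : List (List Int)) : List (Int × List Int) :=
  (variants.foldl (fun (out : PySem.Dict Int (List Int)) variant =>
    let temp : PySem.Set Int := clones.foldl (fun t clone =>
      let cs := PySem.Set.ofList clone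
      if cs.contains variant then t.union cs else t) PySem.Set.empty
    let temp2 := if PySem.Set.len temp == 0 then PySem.Set.ofList variants else temp
    match PySem.Set.remove? temp2 variant with
    | some t3 => out.insert variant t3
    | none => out) PySem.Dict.empty).items

-- ===== PORT B =====
-- one pass over clones: idx[v] = union of the clone sets containing v
def pvBuildIdx (clones : List (List Int)) : PySem.Dict Int (PySem.Set Int) :=
  clones.foldl (fun idx clone =>
    let cs := PySem.Set.ofList clone
    cs.foldl (fun idx v =>
      match idx.get? v with
      | none => idx.insert v cs
      | some s => idx.insert v (s.union cs)) idx) PySem.Dict.empty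

def white_list_alt (variants : List Int) (clones : List (List Int)) : List (Int × List Int) :=
  let idx := pvBuildIdx clones
  let base := PySem.Set.ofList variants
  (variants.foldl (fun (out : PySem.Dict Int (List Int)) v =>
    let temp := match idx.get? v with
      | none => base
      | some s => s
    out.insert v (PySem.Set.discard temp v)) PySem.Dict.empty).items

-- ===== PRECONDITION & SPEC =====
def Spec_white_list (variants : List Int) (clones : List (List Int)) (out : List (Int × List Int)) : Prop := out = white_list_alt variants clones
instance (variants : List Int) (clones : List (List Int)) (out : List (Int × List Int)) : Decidable (Spec_white_list variants clones out) := by unfold Spec_white_list; infer_instance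

-- ===== CLAIM (what is proved, stated in full; the proofs are below) =====
def Claim_equal_white_list : Prop := ∀ (variants : List Int) (clones : List (List Int)), Dom_white_list variants clones → Spec_white_list variants clones (white_list variants clones)

-- ===== LEMMAS AND PROOFS =====

-- the inner step of pvBuildIdx, over the elements of one clone set
def pvInner (cs : PySem.Set Int) (idx : PySem.Dict Int (PySem.Set Int)) (v : Int) : PySem.Dict Int (PySem.Set Int) :=
  match idx.get? v with
  | none => idx.insert v cs
  | some s => idx.insert v (s.union cs)

-- folding pvInner over a list not containing v leaves key v's value unchanged
lemma pvInner_get_not_mem (cs : PySem.Set Int) (l : List Int) (v : Int)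
    (h : v ∉ l) (d : PySem.Dict Int (PySem.Set Int)) :
    (l.foldl (pvInner cs) d).get? v = d.get? v := by
  induction l generalizing d with
  | nil => rfl
  | cons u l ih =>
    simp only [List.mem_cons, not_or] at h
    simp only [List.foldl_cons]
    rw [ih h.2]
    unfold pvInner
    cases d.get? u <;> simp [PySem.Dict.get?_insert_of_ne _ _ h.1]

-- folding pvInner over a nodup list: key v's value after the fold
lemma pvInner_get_mem (cs : PySem.Set Int) (l : List Int) (v : Int)
    (hnd : l.Nodup) (hm : v ∈ l) (d : PySem.Dict Int (PySem.Set Int)) :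
    (l.foldl (pvInner cs) d).get? v =
      some ((d.get? v).elim cs (fun s => s.union cs)) := by
  induction l generalizing d with
  | nil => cases hm
  | cons u l ih =>
    simp only [List.foldl_cons]
    rcases List.nodup_cons.mp hnd with ⟨hu, hnd'⟩
    by_cases hv : v = u
    · subst hv
      rw [pvInner_get_not_mem cs l v hu]
      unfold pvInner
      cases h : d.get? v <;> simp
    · have hm' : v ∈ l := by
        rcases List.mem_cons.mp hm with h | h
        · exact absurd h hv
        · exact h
      rw [ih hnd' hm']
      unfold pvInner
      cases d.get? u <;> simp [PySem.Dict.get?_insert_of_ne _ _ hv]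

-- the per-variant fold A performs over the clones
def pvTemp (v : Int) (clones : List (List Int)) (t : PySem.Set Int) : PySem.Set Int :=
  clones.foldl (fun t clone =>
    let cs := PySem.Set.ofList clone
    if cs.contains v then t.union cs else t) t

-- option-valued mirror of the same fold (what the idx lookup computes)
def pvG (v : Int) (clones : List (List Int)) (o : Option (PySem.Set Int)) : Option (PySem.Set Int) :=
  clones.foldl (fun o clone =>
    let cs := PySem.Set.ofList clone
    if cs.contains v then some (o.elim cs (fun s => s.union cs)) else o) o

lemma pvBuildIdx_get (clones : List (List Int)) (v : Int)
    (d : PySem.Dict Int (PySem.Set Int)) :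
    (clones.foldl (fun idx clone =>
      let cs := PySem.Set.ofList clone
      cs.foldl (pvInner cs) idx) d).get? v = pvG v clones (d.get? v) := by
  induction clones generalizing d with
  | nil => rfl
  | cons c cl ih =>
    simp only [List.foldl_cons]
    rw [ih]
    unfold pvG
    simp only [List.foldl_cons]
    by_cases hm : v ∈ PySem.Set.ofList c
    · rw [pvInner_get_mem _ _ _ (PySem.Set.nodup_ofList c) hm,
        if_pos ((PySem.Set.contains_iff _ _).mpr hm)]
    · rw [pvInner_get_not_mem _ _ _ hm,
        if_neg (by simp [hm])]

lemma pvG_some (v : Int) (clones : List (List Int)) (t : PySem.Set Int) :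
    pvG v clones (some t) = some (pvTemp v clones t) := by
  induction clones generalizing t with
  | nil => rfl
  | cons c cl ih =>
    unfold pvG pvTemp
    simp only [List.foldl_cons]
    by_cases h : (PySem.Set.ofList c).contains v
    · simp only [h, if_pos, Option.elim]
      exact ih _
    · simp only [h, Bool.false_eq_true, ite_false]
      exact ih t

lemma pvTemp_mem (v w : Int) (clones : List (List Int)) (t : PySem.Set Int)
    (h : w ∈ t) : w ∈ pvTemp v clones t := by
  induction clones generalizing t with
  | nil => exact h
  | cons c cl ih =>
    unfold pvTemp
    simp only [List.foldl_cons]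
    by_cases hc : (PySem.Set.ofList c).contains v
    · simp only [hc, if_pos]
      exact ih _ ((PySem.Set.mem_union _ _ _).mpr (Or.inl h))
    · simp only [hc, Bool.false_eq_true, ite_false]
      exact ih _ h

-- key dichotomy: either no clone contains v (lookup none, A's union empty),
-- or the lookup returns exactly A's union, which contains v
lemma pvG_none_cases (v : Int) (clones : List (List Int)) :
    (pvG v clones none = none ∧ pvTemp v clones PySem.Set.empty = PySem.Set.empty) ∨
    (∃ s, pvG v clones none = some s ∧ pvTemp v clones PySem.Set.empty = s ∧ v ∈ s) := by
  induction clones with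
  | nil => exact Or.inl ⟨rfl, rfl⟩
  | cons c cl ih =>
    by_cases hm : v ∈ c
    · have hc : (PySem.Set.ofList c).contains v = true :=
        (PySem.Set.contains_iff _ _).mpr ((PySem.Set.mem_ofList _ _).mpr hm)
      refine Or.inr ⟨pvTemp v cl (PySem.Set.ofList c), ?_, ?_, ?_⟩
      · have : pvG v (c :: cl) none = pvG v cl (some (PySem.Set.ofList c)) := by
          unfold pvG; rw [List.foldl_cons]; simp only [hc, if_true, Option.elim]
        rw [this]; exact pvG_some v cl _
      · have : pvTemp v (c :: cl) PySem.Set.empty =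
            pvTemp v cl (PySem.Set.union PySem.Set.empty (PySem.Set.ofList c)) := by
          unfold pvTemp; rw [List.foldl_cons]; simp only [hc, if_true]
        rw [this,
          show PySem.Set.union (PySem.Set.empty : PySem.Set Int) (PySem.Set.ofList c) =
              PySem.Set.update PySem.Set.empty (PySem.Set.ofList c) from rfl,
          PySem.Set.update_empty,
          PySem.Set.ofList_eq_self_of_nodup _ (PySem.Set.nodup_ofList c)]
      · exact pvTemp_mem v v cl _ ((PySem.Set.mem_ofList _ _).mpr hm)
    · have hc : (PySem.Set.ofList c).contains v = false := by
        simp [PySem.Set.mem_ofList, hm]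
      have e1 : pvG v (c :: cl) none = pvG v cl none := by
        unfold pvG; rw [List.foldl_cons]; simp only [hc, Bool.false_eq_true, if_false]
      have e2 : pvTemp v (c :: cl) PySem.Set.empty = pvTemp v cl PySem.Set.empty := by
        unfold pvTemp; rw [List.foldl_cons]; simp only [hc, Bool.false_eq_true, if_false]
      rw [e1, e2]; exact ih

-- per-variant agreement of the two dict-building steps, for v ∈ variants
lemma pv_step_eq (variants : List Int) (clones : List (List Int)) (v : Int)
    (hv : v ∈ variants) (out : PySem.Dict Int (List Int)) :
    (let temp : PySem.Set Int := clones.foldl (fun t clone =>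
        let cs := PySem.Set.ofList clone
        if cs.contains v then t.union cs else t) PySem.Set.empty
      let temp2 := if PySem.Set.len temp == 0 then PySem.Set.ofList variants else temp
      match PySem.Set.remove? temp2 v with
      | some t3 => out.insert v t3
      | none => out) =
    (let temp := match (pvBuildIdx clones).get? v with
        | none => PySem.Set.ofList variants
        | some s => s
      out.insert v (PySem.Set.discard temp v)) := by
  have hidx : (pvBuildIdx clones).get? v = pvG v clones none := by
    have := pvBuildIdx_get clones v PySem.Dict.empty
    simpa [pvBuildIdx, pvInner, PySem.Dict.get?_empty] using this
  rcases pvG_none_cases v clones with ⟨h1, h2⟩ | ⟨s, h1, h2, h3⟩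
  · -- no clone contains v: A falls back to set(variants), B looks up none
    have hvv : v ∈ PySem.Set.ofList variants := (PySem.Set.mem_ofList _ _).mpr hv
    simp only [hidx, h1]
    show (let temp := pvTemp v clones PySem.Set.empty
          let temp2 := if PySem.Set.len temp == 0 then PySem.Set.ofList variants else temp
          match PySem.Set.remove? temp2 v with
          | some t3 => out.insert v t3
          | none => out) = _
    rw [h2]
    simp only [PySem.Set.len_eq, PySem.Set.empty, List.length_nil, Int.natCast_zero,
      beq_self_eq_true, if_pos, PySem.Set.remove?_of_mem hvv]
  · -- some clone contains v: the lookup is exactly A's union, nonempty and containing v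
    simp only [hidx, h1]
    show (let temp := pvTemp v clones PySem.Set.empty
          let temp2 := if PySem.Set.len temp == 0 then PySem.Set.ofList variants else temp
          match PySem.Set.remove? temp2 v with
          | some t3 => out.insert v t3
          | none => out) = _
    rw [h2]
    have hne : s ≠ [] := by intro h; rw [h] at h3; cases h3
    have hlen : (PySem.Set.len s == 0) = false := by
      simp [PySem.Set.len_eq, List.length_eq_zero_iff, hne]
    simp only [hlen, Bool.false_eq_true, ite_false, PySem.Set.remove?_of_mem h3]

-- ===== VERDICT (by name: the statement is the Claim_ definition above) =====
theorem white_list_spec : Claim_equal_white_list := by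
  intro variants clones _
  show white_list variants clones = white_list_alt variants clones
  unfold white_list white_list_alt
  congr 1
  exact PySem.List.foldl_congr_mem variants _ _ _
    (fun out v hv => pv_step_eq variants clones v hv out)
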